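-- pv_equiv track=rewrite | github.com/grapheneaffiliate/h4-polytopic-attention | solve_arc_b7.py | solve_54d82841
-- ===== SOURCE A (Python) =====
-- def solve_54d82841(grid):
--     h, w = len(grid), len(grid[0])
--     out = [row[:] for row in grid]
--
--     # Find U-shapes: look for patterns like [X,X,X] on top and [X,0,X] below
--     # (or rotated versions)
--     # The shapes are ⊓-shaped (3 cells on top, 2 cells below with gap)
--
--     # Find all non-zero colored shapes
--     visited = [[False]*w for _ in range(h)]
--
--     def flood_fill(sr, sc, color):
--         cells = []
--         stack = [(sr, sc)]
--         while stack:
--             r, c = stack.pop()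
--             if r < 0 or r >= h or c < 0 or c >= w:
--                 continue
--             if visited[r][c] or grid[r][c] != color:
--                 continue
--             visited[r][c] = True
--             cells.append((r, c))
--             for dr, dc in [(-1,0),(1,0),(0,-1),(0,1)]:
--                 stack.append((r+dr, c+dc))
--         return cells
--
--     shapes = []
--     for r in range(h):
--         for c in range(w):
--             if grid[r][c] != 0 and not visited[r][c]:
--                 color = grid[r][c]
--                 cells = flood_fill(r, c, color)
--                 shapes.append((color, cells))
--
--     # For each shape, find the "opening" - the 0-cell that's enclosed on 3 sides
--     for color, cells in shapes:
--         cell_set = set(cells)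
--         rs = [r for r, c in cells]
--         cs = [c for r, c in cells]
--         min_r, max_r = min(rs), max(rs)
--         min_c, max_c = min(cs), max(cs)
--
--         # Check for opening: find 0-cells within/adjacent to bbox that have 3 colored neighbors
--         # Actually the U-shape has a specific gap. Let me find it.
--         # The opening is a cell within the bbox that is 0 and surrounded by shape cells on 3 sides.
--         for r in range(min_r, max_r + 1):
--             for c in range(min_c, max_c + 1):
--                 if (r, c) not in cell_set and grid[r][c] == 0:
--                     # Count adjacent shape cells
--                     adj = 0
--                     for dr, dc in [(-1,0),(1,0),(0,-1),(0,1)]: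
--                         nr, nc = r + dr, c + dc
--                         if (nr, nc) in cell_set:
--                             adj += 1
--                     if adj >= 3:
--                         # This is the opening - place 4 at bottom of grid in this column
--                         out[h-1][c] = 4
--
--     return out
-- ===== SOURCE B (Python) =====
-- def solve_54d82841(grid):
--     h, w = len(grid), len(grid[0])
--
--     # Label every nonzero cell with the id of its connected same-color shape.
--     owner = {}
--     sid = 0
--     for r0 in range(h):
--         for c0 in range(w):
--             if grid[r0][c0] != 0 and (r0, c0) not in owner:
--                 color = grid[r0][c0]
--                 stack = [(r0, c0)]
--                 while stack:
--                     r, c = stack.pop()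
--                     if r < 0 or r >= h or c < 0 or c >= w:
--                         continue
--                     if (r, c) in owner or grid[r][c] != color:
--                         continue
--                     owner[(r, c)] = sid
--                     stack.append((r - 1, c))
--                     stack.append((r + 1, c))
--                     stack.append((r, c - 1))
--                     stack.append((r, c + 1))
--                 sid += 1
--
--     # Single pass over all 0-cells: a cell is an opening iff one shape id
--     # occurs at least 3 times among its 4 neighbours.
--     out = [row[:] for row in grid]
--     for r in range(h):
--         for c in range(w):
--             if grid[r][c] == 0:
--                 ids = [owner[nb] for nb in ((r - 1, c), (r + 1, c), (r, c - 1), (r, c + 1))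
--                        if nb in owner]
--                 if any(ids.count(i) >= 3 for i in ids):
--                     out[h - 1][c] = 4
--     return out
-- ===== Notes on version B (the rewrite author's own statement) =====
-- stated objective: faster
-- what changed: Instead of collecting per-shape cell lists and rescanning each shape's bounding box for 0-cells with >=3 neighbours in the shape, B labels every nonzero cell with a shape id during the flood fill and then makes one global pass over all 0-cells, marking a column when some single shape id occurs >=3 times among the cell's 4 neighbours; the per-shape bbox double loop, cell_set and min/max computations disappear. Intended as faster; a timing run measured B at about 1.5-2x on generated inputs, reading 1.54x median at the largest size (not consistently >=1.5x per input).
import Mathlib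
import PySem

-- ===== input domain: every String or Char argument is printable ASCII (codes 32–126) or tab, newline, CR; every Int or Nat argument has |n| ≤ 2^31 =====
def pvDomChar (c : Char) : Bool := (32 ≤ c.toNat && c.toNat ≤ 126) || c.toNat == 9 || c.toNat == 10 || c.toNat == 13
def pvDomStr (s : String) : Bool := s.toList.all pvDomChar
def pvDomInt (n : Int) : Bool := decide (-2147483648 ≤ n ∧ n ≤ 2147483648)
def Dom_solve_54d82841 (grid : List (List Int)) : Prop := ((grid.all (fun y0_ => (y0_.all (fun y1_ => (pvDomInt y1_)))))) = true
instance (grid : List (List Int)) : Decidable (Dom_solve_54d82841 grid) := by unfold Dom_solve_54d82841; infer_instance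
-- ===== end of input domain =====

-- B labels every nonzero cell with a shape id during the flood fill and replaces A's
-- per-shape bounding-box rescan (with its cell_set/min/max bookkeeping) by one global
-- pass over 0-cells that counts shape ids among the 4 neighbours (objective: faster;
-- a timing run measured B at ~1.5-2x on generated inputs, 1.54x median at the
-- largest size, not consistently >=1.5x per input).

-- shared primitive: grid[r][c]; only ever evaluated under 0 ≤ r < h, 0 ≤ c < w guards
def pvCell (grid : List (List Int)) (r c : Int) : Int :=
  (grid.getD r.toNat []).getD c.toNat 0

-- out[r][c] = 4
def pvWrite (out : List (List Int)) (r c : Nat) : List (List Int) :=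
  out.modify r (fun row => row.set c 4)

-- fuel for the while-loops: a totality guard only, large enough to never be exhausted
def pvFuel (grid : List (List Int)) : Nat :=
  5 * grid.length * (grid.headD []).length + 1

-- ===== PORT A =====
-- A's flood_fill: explicit stack (append-to-end/pop-from-end = cons/head), global
-- visited matrix ported as the set of visited coordinates, collects the cells list.
def pvFloodA (grid : List (List Int)) (hI wI color : Int) :
    Nat → List (Int × Int) → List (Int × Int) → List (Int × Int) →
    List (Int × Int) × List (Int × Int)
  | 0, visited, cells, _ => (visited, cells)
  | _ + 1, visited, cells, [] => (visited, cells)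
  | fuel + 1, visited, cells, (r, c) :: stack =>
    if r < 0 ∨ hI ≤ r ∨ c < 0 ∨ wI ≤ c then
      pvFloodA grid hI wI color fuel visited cells stack
    else if (r, c) ∈ visited ∨ pvCell grid r c ≠ color then
      pvFloodA grid hI wI color fuel visited cells stack
    else
      pvFloodA grid hI wI color fuel ((r, c) :: visited) (cells ++ [(r, c)])
        ((r, c + 1) :: (r, c - 1) :: (r + 1, c) :: (r - 1, c) :: stack)

-- the scan that builds the shapes list (state: visited set, shapes)
def pvShapesA (grid : List (List Int)) :
    List (Int × Int) × List (Int × List (Int × Int)) :=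
  (List.range grid.length).foldl (fun st (r : Nat) =>
    (List.range (grid.headD []).length).foldl (fun st (c : Nat) =>
      if pvCell grid (r : Int) (c : Int) ≠ 0 ∧ ((r : Int), (c : Int)) ∉ st.1 then
        let res := pvFloodA grid (grid.length : Int) ((grid.headD []).length : Int)
          (pvCell grid (r : Int) (c : Int)) (pvFuel grid) st.1 [] [((r : Int), (c : Int))]
        (res.1, st.2 ++ [(pvCell grid (r : Int) (c : Int), res.2)])
      else st) st) ([], [])

-- adj counter of A's inner check
def pvAdjA (cells : List (Int × Int)) (r c : Int) : Int :=
  [((-1 : Int), (0 : Int)), (1, 0), (0, -1), (0, 1)].foldl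
    (fun adj d => if (r + d.1, c + d.2) ∈ cells then adj + 1 else adj) 0

-- A's per-shape pass: bbox from min/max of the cells, scan the bbox, mark openings
def pvMarkShapeA (grid : List (List Int)) (cells : List (Int × Int))
    (out : List (List Int)) : List (List Int) :=
  let rs := cells.map (fun x => x.1)
  let cs := cells.map (fun x => x.2)
  let minR := (PySem.List.min? rs (fun x => x)).getD 0
  let maxR := (PySem.List.max? rs (fun x => x)).getD 0
  let minC := (PySem.List.min? cs (fun x => x)).getD 0
  let maxC := (PySem.List.max? cs (fun x => x)).getD 0
  (PySem.List.pyRange minR (maxR + 1) 1).foldl (fun out r =>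
    (PySem.List.pyRange minC (maxC + 1) 1).foldl (fun out c =>
      if (r, c) ∉ cells ∧ pvCell grid r c = 0 then
        if 3 ≤ pvAdjA cells r c then pvWrite out (grid.length - 1) c.toNat else out
      else out) out) out

def solve_54d82841 (grid : List (List Int)) : List (List Int) :=
  ((pvShapesA grid).2).foldl (fun out sh => pvMarkShapeA grid sh.2 out)
    (grid.map (fun row => row))

-- ===== PORT B =====
-- B's flood fill writes shape ids straight into the `owner` dict (no cells list)
def pvFloodB (grid : List (List Int)) (hI wI color sid : Int) :
    Nat → PySem.Dict (Int × Int) Int → List (Int × Int) → PySem.Dict (Int × Int) Int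
  | 0, owner, _ => owner
  | _ + 1, owner, [] => owner
  | fuel + 1, owner, (r, c) :: stack =>
    if r < 0 ∨ hI ≤ r ∨ c < 0 ∨ wI ≤ c then
      pvFloodB grid hI wI color sid fuel owner stack
    else if owner.contains (r, c) ∨ pvCell grid r c ≠ color then
      pvFloodB grid hI wI color sid fuel owner stack
    else
      pvFloodB grid hI wI color sid fuel (owner.insert (r, c) sid)
        ((r, c + 1) :: (r, c - 1) :: (r + 1, c) :: (r - 1, c) :: stack)

-- label every nonzero cell with its shape id (state: owner dict, next id)
def pvOwnerB (grid : List (List Int)) : PySem.Dict (Int × Int) Int × Int :=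
  (List.range grid.length).foldl (fun st (r : Nat) =>
    (List.range (grid.headD []).length).foldl (fun st (c : Nat) =>
      if pvCell grid (r : Int) (c : Int) ≠ 0 ∧ ¬ st.1.contains ((r : Int), (c : Int)) then
        (pvFloodB grid (grid.length : Int) ((grid.headD []).length : Int)
          (pvCell grid (r : Int) (c : Int)) st.2 (pvFuel grid) st.1 [((r : Int), (c : Int))],
         st.2 + 1)
      else st) st) (PySem.Dict.empty, 0)

def pvNbrs (r c : Int) : List (Int × Int) := [(r - 1, c), (r + 1, c), (r, c - 1), (r, c + 1)]

-- [owner[nb] for nb in nbrs if nb in owner]  (owner[nb] is guarded by the filter)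
def pvIdsB (owner : PySem.Dict (Int × Int) Int) (r c : Int) : List Int :=
  ((pvNbrs r c).filter (fun nb => owner.contains nb)).map (fun nb => (owner.get? nb).getD 0)

def solve_54d82841_alt (grid : List (List Int)) : List (List Int) :=
  let owner := (pvOwnerB grid).1
  (List.range grid.length).foldl (fun out (r : Nat) =>
    (List.range (grid.headD []).length).foldl (fun out (c : Nat) =>
      if pvCell grid (r : Int) (c : Int) = 0 then
        let ids := pvIdsB owner (r : Int) (c : Int)
        if ids.any (fun i => decide (3 ≤ ids.count i)) then
          pvWrite out (grid.length - 1) c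
        else out
      else out) out) (grid.map (fun row => row))

-- ===== PRECONDITION & SPEC =====
-- Pre_ excludes exactly the inputs on which A raises: the empty grid (grid[0] is an
-- IndexError) and grids with a row shorter than the first row (grid[r][c] raises
-- during the scan).  A returns normally on every other input.
def Pre_solve_54d82841 (grid : List (List Int)) : Prop :=
  grid ≠ [] ∧ ∀ row ∈ grid, (grid.headD []).length ≤ row.length
instance (grid : List (List Int)) : Decidable (Pre_solve_54d82841 grid) := by
  unfold Pre_solve_54d82841; infer_instance

def pvWitness_solve_54d82841 : List (List Int) :=
  [[1, 1, 1], [1, 0, 1], [0, 0, 0]]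

def Spec_solve_54d82841 (grid : List (List Int)) (out : List (List Int)) : Prop := out = solve_54d82841_alt grid
instance (grid : List (List Int)) (out : List (List Int)) : Decidable (Spec_solve_54d82841 grid out) := by unfold Spec_solve_54d82841; infer_instance

-- ===== CLAIM (what is proved, stated in full; the proofs are below) =====
def Claim_equal_solve_54d82841 : Prop := ∀ (grid : List (List Int)), Dom_solve_54d82841 grid → Pre_solve_54d82841 grid → Spec_solve_54d82841 grid (solve_54d82841 grid)

-- ===== LEMMAS AND PROOFS =====

-- flood lockstep
theorem pv_flood_sim (grid : List (List Int)) (hI wI color sid : Int) :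
    ∀ (fuel : Nat) (stack : List (Int × Int)) (visited cells : List (Int × Int))
      (owner : PySem.Dict (Int × Int) Int),
      (∀ x, x ∈ visited ↔ owner.contains x = true) →
      (∀ x, x ∈ cells ↔ owner.get? x = some sid) →
      (∀ x, x ∈ (pvFloodA grid hI wI color fuel visited cells stack).1 ↔
        (pvFloodB grid hI wI color sid fuel owner stack).contains x = true) ∧
      (∀ x, x ∈ (pvFloodA grid hI wI color fuel visited cells stack).2 ↔
        (pvFloodB grid hI wI color sid fuel owner stack).get? x = some sid) ∧
      (∀ x (i : Int), i ≠ sid →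
        ((pvFloodB grid hI wI color sid fuel owner stack).get? x = some i ↔ owner.get? x = some i)) := by
  intro fuel
  induction fuel with
  | zero => intro stack visited cells owner h1 h2
            exact ⟨h1, h2, fun x i _ => Iff.rfl⟩
  | succ fuel ih =>
    intro stack visited cells owner h1 h2
    match stack with
    | [] => exact ⟨h1, h2, fun x i _ => Iff.rfl⟩
    | (r, c) :: stack =>
      simp only [pvFloodA, pvFloodB]
      by_cases hb : r < 0 ∨ hI ≤ r ∨ c < 0 ∨ wI ≤ c
      · simp only [if_pos hb]
        exact ih stack visited cells owner h1 h2
      · simp only [if_neg hb]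
        by_cases hv : (r, c) ∈ visited ∨ pvCell grid r c ≠ color
        · have hv' : owner.contains (r, c) = true ∨ pvCell grid r c ≠ color := by
            rcases hv with h | h
            · exact Or.inl ((h1 _).1 h)
            · exact Or.inr h
          simp only [if_pos hv, if_pos hv']
          exact ih stack visited cells owner h1 h2
        · have hv' : ¬ (owner.contains (r, c) = true ∨ pvCell grid r c ≠ color) := by
            intro h
            rcases h with h | h
            · exact hv (Or.inl ((h1 _).2 h))
            · exact hv (Or.inr h)
          simp only [if_neg hv, if_neg hv']
          have hnc : ¬ owner.contains (r, c) = true := fun h => hv (Or.inl ((h1 _).2 h))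
          have hA : ∀ x, x ∈ ((r, c) :: visited) ↔ (owner.insert (r, c) sid).contains x = true := by
            intro x
            rw [PySem.Dict.contains_insert]
            simp only [List.mem_cons]
            constructor
            · rintro (h | h)
              · subst h; simp
              · simp [(h1 x).1 h]
            · intro h
              rcases Bool.or_eq_true_iff.1 h with h | h
              · exact Or.inl (by simpa using (beq_iff_eq.1 h))
              · exact Or.inr ((h1 x).2 h)
          have hB : ∀ x, x ∈ (cells ++ [(r, c)]) ↔ (owner.insert (r, c) sid).get? x = some sid := by
            intro x
            rw [PySem.Dict.get?_insert]
            by_cases hx : x = (r, c)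
            · subst hx; simp
            · simp only [if_neg hx, List.mem_append, List.mem_singleton]
              constructor
              · rintro (h | h)
                · exact (h2 x).1 h
                · exact absurd h hx
              · intro h; exact Or.inl ((h2 x).2 h)
          obtain ⟨g1, g2, g3⟩ := ih ((r, c + 1) :: (r, c - 1) :: (r + 1, c) :: (r - 1, c) :: stack)
            ((r, c) :: visited) (cells ++ [(r, c)]) (owner.insert (r, c) sid) hA hB
          refine ⟨g1, g2, fun x i hi => (g3 x i hi).trans ?_⟩
          rw [PySem.Dict.get?_insert]
          by_cases hx : x = (r, c)
          · subst hx
            rw [if_pos rfl]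
            have hnone : owner.get? (r, c) = none := by
              cases hcg : owner.get? (r, c) with
              | none => rfl
              | some v => exact absurd (by rw [PySem.Dict.contains_eq_isSome_get?, hcg]; rfl) hnc
            rw [hnone]
            constructor
            · intro h; exact absurd (Option.some.inj h).symm hi
            · intro h; simp at h
          · rw [if_neg hx]
theorem pv_floodA_mono (grid : List (List Int)) (hI wI color : Int) :
    ∀ (fuel : Nat) (stack visited cells : List (Int × Int)) (x : Int × Int),
      x ∈ cells → x ∈ (pvFloodA grid hI wI color fuel visited cells stack).2 := by
  intro fuel
  induction fuel with
  | zero => intro stack visited cells x hx; exact hx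
  | succ fuel ih =>
    intro stack visited cells x hx
    match stack with
    | [] => exact hx
    | (r, c) :: stack =>
      simp only [pvFloodA]
      split
      · exact ih stack visited cells x hx
      · split
        · exact ih stack visited cells x hx
        · exact ih _ _ _ x (List.mem_append_left _ hx)

theorem pv_floodA_prop (grid : List (List Int)) (hI wI color : Int) (P : Int × Int → Prop)
    (hP : ∀ r c : Int, ¬(r < 0 ∨ hI ≤ r ∨ c < 0 ∨ wI ≤ c) → pvCell grid r c = color → P (r, c)) :
    ∀ (fuel : Nat) (stack visited cells : List (Int × Int)),
      (∀ x ∈ cells, P x) →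
      ∀ x ∈ (pvFloodA grid hI wI color fuel visited cells stack).2, P x := by
  intro fuel
  induction fuel with
  | zero => intro stack visited cells hc x hx; exact hc x hx
  | succ fuel ih =>
    intro stack visited cells hc
    match stack with
    | [] => exact hc
    | (r, c) :: stack =>
      simp only [pvFloodA]
      split
      · exact ih stack visited cells hc
      · split
        · exact ih stack visited cells hc
        · rename_i hb hv
          refine ih _ _ _ ?_
          intro x hx
          rcases List.mem_append.1 hx with h | h
          · exact hc x h
          · rcases List.mem_singleton.1 h with rfl
            refine hP r c hb ?_
            by_contra hne
            exact hv (Or.inr hne)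

theorem pv_floodA_seed (grid : List (List Int)) (hI wI color : Int)
    (fuel : Nat) (visited cells : List (Int × Int)) (r0 c0 : Int)
    (hb : ¬(r0 < 0 ∨ hI ≤ r0 ∨ c0 < 0 ∨ wI ≤ c0))
    (hnv : (r0, c0) ∉ visited) (hval : pvCell grid r0 c0 = color) :
    (r0, c0) ∈ (pvFloodA grid hI wI color (fuel + 1) visited cells [(r0, c0)]).2 := by
  simp only [pvFloodA]
  rw [if_neg hb, if_neg (by
    intro h
    rcases h with h | h
    · exact hnv h
    · exact h hval)]
  exact pv_floodA_mono grid hI wI color fuel _ _ _ _ (List.mem_append_right _ (List.mem_singleton.2 rfl))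
-- the scan invariant relating A's (visited, shapes) to B's (owner, next id)
def pvInv (grid : List (List Int)) (st : List (Int × Int) × List (Int × List (Int × Int)))
    (ob : PySem.Dict (Int × Int) Int × Int) : Prop :=
  ob.2 = (st.2.length : Int) ∧
  (∀ x, x ∈ st.1 ↔ ob.1.contains x = true) ∧
  (∀ k : Nat, k < st.2.length → ∀ x, (x ∈ (st.2.getD k (0, [])).2 ↔ ob.1.get? x = some (k : Int))) ∧
  (∀ x i, ob.1.get? x = some i → 0 ≤ i ∧ i < ob.2) ∧
  (∀ k : Nat, k < st.2.length → (st.2.getD k (0, [])).2 ≠ [] ∧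
    ∀ x ∈ (st.2.getD k (0, [])).2,
      0 ≤ x.1 ∧ x.1 < (grid.length : Int) ∧ 0 ≤ x.2 ∧ x.2 < ((grid.headD []).length : Int) ∧
      pvCell grid x.1 x.2 = (st.2.getD k (0, [])).1 ∧ (st.2.getD k (0, [])).1 ≠ 0)

theorem pv_foldl_rel {α β γ : Type} (R : β → γ → Prop) (f : β → α → β) (g : γ → α → γ) :
    ∀ (L : List α) (b : β) (c : γ), R b c →
      (∀ a ∈ L, ∀ b c, R b c → R (f b a) (g c a)) → R (L.foldl f b) (L.foldl g c) := by
  intro L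
  induction L with
  | nil => intro b c hR _; exact hR
  | cons a L ih =>
    intro b c hR hstep
    exact ih (f b a) (g c a) (hstep a (List.mem_cons_self) b c hR)
      (fun a' ha' => hstep a' (List.mem_cons_of_mem a ha'))

theorem pv_scan_step (grid : List (List Int)) (r c : Nat)
    (hr : r < grid.length) (hc : c < (grid.headD []).length)
    (st : List (Int × Int) × List (Int × List (Int × Int)))
    (ob : PySem.Dict (Int × Int) Int × Int) (hinv : pvInv grid st ob) :
    pvInv grid
      (if pvCell grid (r : Int) (c : Int) ≠ 0 ∧ ((r : Int), (c : Int)) ∉ st.1 then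
        let res := pvFloodA grid (grid.length : Int) ((grid.headD []).length : Int)
          (pvCell grid (r : Int) (c : Int)) (pvFuel grid) st.1 [] [((r : Int), (c : Int))]
        (res.1, st.2 ++ [(pvCell grid (r : Int) (c : Int), res.2)])
      else st)
      (if pvCell grid (r : Int) (c : Int) ≠ 0 ∧ ¬ ob.1.contains ((r : Int), (c : Int)) then
        (pvFloodB grid (grid.length : Int) ((grid.headD []).length : Int)
          (pvCell grid (r : Int) (c : Int)) ob.2 (pvFuel grid) ob.1 [((r : Int), (c : Int))],
         ob.2 + 1)
      else ob) := by
  obtain ⟨hsid, hmem, hcls, hrange, hprops⟩ := hinv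
  by_cases hg : pvCell grid (r : Int) (c : Int) ≠ 0 ∧ ((r : Int), (c : Int)) ∉ st.1
  · have hg' : pvCell grid (r : Int) (c : Int) ≠ 0 ∧ ¬ ob.1.contains ((r : Int), (c : Int)) := by
      refine ⟨hg.1, fun h => hg.2 ((hmem _).2 h)⟩
    rw [if_pos hg, if_pos hg']
    have h2 : ∀ x, x ∈ ([] : List (Int × Int)) ↔ ob.1.get? x = some ob.2 := by
      intro x
      simp only [List.not_mem_nil, false_iff]
      intro h
      exact absurd (hrange x ob.2 h).2 (lt_irrefl _)
    obtain ⟨g1, g2, g3⟩ := pv_flood_sim grid (grid.length : Int) ((grid.headD []).length : Int)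
      (pvCell grid (r : Int) (c : Int)) ob.2 (pvFuel grid) [((r : Int), (c : Int))] st.1 [] ob.1 hmem h2
    have hb : ¬((r : Int) < 0 ∨ (grid.length : Int) ≤ (r : Int) ∨ (c : Int) < 0 ∨
        ((grid.headD []).length : Int) ≤ (c : Int)) := by
      omega
    have hseed : ((r : Int), (c : Int)) ∈ (pvFloodA grid (grid.length : Int)
        ((grid.headD []).length : Int) (pvCell grid (r : Int) (c : Int)) (pvFuel grid)
        st.1 [] [((r : Int), (c : Int))]).2 := by
      have : pvFuel grid = 5 * grid.length * (grid.headD []).length + 1 := rfl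
      rw [this]
      exact pv_floodA_seed grid _ _ _ _ st.1 [] (r : Int) (c : Int) hb hg.2 rfl
    refine ⟨?_, g1, ?_, ?_, ?_⟩
    · simp only [List.length_append, List.length_singleton]
      push_cast
      omega
    · intro k hk x
      simp only [List.length_append, List.length_singleton] at hk
      by_cases hklt : k < st.2.length
      · rw [List.getD_append _ _ _ _ hklt]
        have hksid : (k : Int) ≠ ob.2 := by
          rw [hsid]; omega
        rw [g3 x (k : Int) hksid]
        exact hcls k hklt x
      · have hkeq : k = st.2.length := by omega
        subst hkeq
        have : (st.2 ++ [(pvCell grid (r : Int) (c : Int),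
            (pvFloodA grid (grid.length : Int) ((grid.headD []).length : Int)
              (pvCell grid (r : Int) (c : Int)) (pvFuel grid) st.1 [] [((r : Int), (c : Int))]).2)]).getD
            st.2.length (0, []) =
            (pvCell grid (r : Int) (c : Int),
            (pvFloodA grid (grid.length : Int) ((grid.headD []).length : Int)
              (pvCell grid (r : Int) (c : Int)) (pvFuel grid) st.1 [] [((r : Int), (c : Int))]).2) := by
          rw [List.getD_eq_getElem?_getD, List.getElem?_concat_length]
          rfl
        rw [this, ← hsid]
        exact g2 x
    · intro x i hgi
      by_cases hi : i = ob.2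
      · subst hi
        constructor
        · rw [hsid]; positivity
        · omega
      · have := hrange x i ((g3 x i hi).1 hgi)
        omega
    · intro k hk
      simp only [List.length_append, List.length_singleton] at hk
      by_cases hklt : k < st.2.length
      · rw [List.getD_append _ _ _ _ hklt]
        exact hprops k hklt
      · have hkeq : k = st.2.length := by omega
        subst hkeq
        rw [show (st.2 ++ [(pvCell grid (r : Int) (c : Int),
            (pvFloodA grid (grid.length : Int) ((grid.headD []).length : Int)
              (pvCell grid (r : Int) (c : Int)) (pvFuel grid) st.1 [] [((r : Int), (c : Int))]).2)]).getD
            st.2.length (0, []) =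
            (pvCell grid (r : Int) (c : Int),
            (pvFloodA grid (grid.length : Int) ((grid.headD []).length : Int)
              (pvCell grid (r : Int) (c : Int)) (pvFuel grid) st.1 [] [((r : Int), (c : Int))]).2)
          from by rw [List.getD_eq_getElem?_getD, List.getElem?_concat_length]; rfl]
        refine ⟨fun hnil => by rw [hnil] at hseed; simp at hseed, ?_⟩
        intro x hx
        have hPx := pv_floodA_prop grid (grid.length : Int) ((grid.headD []).length : Int)
          (pvCell grid (r : Int) (c : Int))
          (fun y => 0 ≤ y.1 ∧ y.1 < (grid.length : Int) ∧ 0 ≤ y.2 ∧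
            y.2 < ((grid.headD []).length : Int) ∧ pvCell grid y.1 y.2 = pvCell grid (r : Int) (c : Int))
          (by
            intro r' c' hb' hv'
            refine ⟨by omega, by omega, by omega, by omega, hv'⟩)
          (pvFuel grid) [((r : Int), (c : Int))] st.1 [] (by intro y hy; cases hy) x hx
        exact ⟨hPx.1, hPx.2.1, hPx.2.2.1, hPx.2.2.2.1, hPx.2.2.2.2, hg.1⟩
  · have hg' : ¬ (pvCell grid (r : Int) (c : Int) ≠ 0 ∧ ¬ ob.1.contains ((r : Int), (c : Int))) := by
      intro h
      exact hg ⟨h.1, fun hmem' => h.2 ((hmem _).1 hmem')⟩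
    rw [if_neg hg, if_neg hg']
    exact ⟨hsid, hmem, hcls, hrange, hprops⟩
theorem pv_scan_inv (grid : List (List Int)) : pvInv grid (pvShapesA grid) (pvOwnerB grid) := by
  unfold pvShapesA pvOwnerB
  refine pv_foldl_rel (pvInv grid) _ _ (List.range grid.length) _ _ ?_ ?_
  · refine ⟨rfl, ?_, ?_, ?_, ?_⟩
    · intro x; simp [PySem.Dict.contains_empty]
    · intro k hk; simp at hk
    · intro x i h; rw [PySem.Dict.get?_empty] at h; cases h
    · intro k hk; simp at hk
  · intro r hr st ob hinv
    refine pv_foldl_rel (pvInv grid) _ _ (List.range (grid.headD []).length) _ _ hinv ?_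
    intro c hc st ob hinv
    exact pv_scan_step grid r c (List.mem_range.1 hr) (List.mem_range.1 hc) st ob hinv
-- canonical form of "a fold that only ever writes 4 into row m"
def pvCanon (base : List (List Int)) (m : Nat) (f : Nat → Bool) : List (List Int) :=
  base.modify m (fun row => row.mapIdx (fun c v => if f c then 4 else v))

theorem pv_canon_false (base : List (List Int)) (m : Nat) :
    pvCanon base m (fun _ => false) = base := by
  unfold pvCanon
  apply List.ext_getElem
  · simp
  · intro i h1 h2
    rw [List.getElem_modify]
    split
    · apply List.ext_getElem <;> simp
    · rfl

theorem pv_write_canon (base : List (List Int)) (m : Nat) (f : Nat → Bool) (c : Nat) :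
    pvWrite (pvCanon base m f) m c = pvCanon base m (fun c' => f c' || (c' == c)) := by
  unfold pvCanon pvWrite
  apply List.ext_getElem
  · simp
  · intro i h1 h2
    rw [List.getElem_modify, List.getElem_modify, List.getElem_modify]
    by_cases him : m = i
    · subst him
      rw [if_pos rfl, if_pos rfl, if_pos rfl]
      apply List.ext_getElem
      · simp
      · intro j hj1 hj2
        simp only [List.length_set, List.length_mapIdx] at hj1 hj2 ⊢
        rw [List.getElem_set]
        by_cases hjc : c = j
        · subst hjc
          rw [if_pos rfl, List.getElem_mapIdx]
          simp
        · rw [if_neg hjc, List.getElem_mapIdx, List.getElem_mapIdx]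
          have : (j == c) = false := by simp [Ne.symm hjc]
          simp [this]
    · rw [if_neg him, if_neg him, if_neg him]

theorem pv_foldl_write_canon {α : Type} (m : Nat) (base : List (List Int))
    (p : α → Prop) [DecidablePred p] (col : α → Nat) :
    ∀ (L : List α) (f : Nat → Bool),
      L.foldl (fun o x => if p x then pvWrite o m (col x) else o) (pvCanon base m f) =
        pvCanon base m (fun c => f c || L.any (fun x => decide (p x) && (c == col x))) := by
  intro L
  induction L with
  | nil => intro f; simp
  | cons a L ih =>
    intro f
    simp only [List.foldl_cons, List.any_cons]
    by_cases hp : p a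
    · rw [if_pos hp, pv_write_canon, ih]
      congr 1
      funext c
      simp only [decide_eq_true hp, Bool.true_and]
      rw [Bool.or_assoc]
    · rw [if_neg hp, ih]
      congr 1
      funext c
      simp [hp]

theorem pv_foldl_write_canon2 {α β : Type} (m : Nat) (base : List (List Int))
    (L2 : α → List β) (p : α → β → Prop) [∀ a b, Decidable (p a b)] (col : α → β → Nat) :
    ∀ (L1 : List α) (f : Nat → Bool),
      L1.foldl (fun o x => (L2 x).foldl (fun o y => if p x y then pvWrite o m (col x y) else o) o)
        (pvCanon base m f) =
        pvCanon base m (fun c => f c ||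
          L1.any (fun x => (L2 x).any (fun y => decide (p x y) && (c == col x y)))) := by
  intro L1
  induction L1 with
  | nil => intro f; simp
  | cons a L ih =>
    intro f
    simp only [List.foldl_cons, List.any_cons]
    rw [pv_foldl_write_canon m base (p a) (col a) (L2 a) f, ih]
    congr 1
    funext c
    rw [Bool.or_assoc]

theorem pv_foldl_write_canon3 {α β γ : Type} (m : Nat) (base : List (List Int))
    (L2 : α → List β) (L3 : α → β → List γ) (p : α → β → γ → Prop)
    [∀ a b c, Decidable (p a b c)] (col : α → β → γ → Nat) :
    ∀ (L1 : List α) (f : Nat → Bool),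
      L1.foldl (fun o x => (L2 x).foldl (fun o y =>
          (L3 x y).foldl (fun o z => if p x y z then pvWrite o m (col x y z) else o) o) o)
        (pvCanon base m f) =
        pvCanon base m (fun c => f c ||
          L1.any (fun x => (L2 x).any (fun y => (L3 x y).any (fun z =>
            decide (p x y z) && (c == col x y z))))) := by
  intro L1
  induction L1 with
  | nil => intro f; simp
  | cons a L ih =>
    intro f
    simp only [List.foldl_cons, List.any_cons]
    rw [pv_foldl_write_canon2 m base (L3 a) (p a) (col a) (L2 a) f, ih]
    congr 1
    funext c
    rw [Bool.or_assoc]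
def pvMinR (cells : List (Int × Int)) : Int :=
  (PySem.List.min? (cells.map (fun x => x.1)) (fun x => x)).getD 0
def pvMaxR (cells : List (Int × Int)) : Int :=
  (PySem.List.max? (cells.map (fun x => x.1)) (fun x => x)).getD 0
def pvMinC (cells : List (Int × Int)) : Int :=
  (PySem.List.min? (cells.map (fun x => x.2)) (fun x => x)).getD 0
def pvMaxC (cells : List (Int × Int)) : Int :=
  (PySem.List.max? (cells.map (fun x => x.2)) (fun x => x)).getD 0

theorem pv_markA_eq (grid : List (List Int)) (cells : List (Int × Int)) (out : List (List Int)) :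
    pvMarkShapeA grid cells out =
      (PySem.List.pyRange (pvMinR cells) (pvMaxR cells + 1) 1).foldl (fun o r =>
        (PySem.List.pyRange (pvMinC cells) (pvMaxC cells + 1) 1).foldl (fun o c =>
          if ((r, c) ∉ cells ∧ pvCell grid r c = 0) ∧ 3 ≤ pvAdjA cells r c then
            pvWrite o (grid.length - 1) c.toNat
          else o) o) out := by
  show (PySem.List.pyRange (pvMinR cells) (pvMaxR cells + 1) 1).foldl (fun out r =>
      (PySem.List.pyRange (pvMinC cells) (pvMaxC cells + 1) 1).foldl (fun out c =>
        if (r, c) ∉ cells ∧ pvCell grid r c = 0 then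
          if 3 ≤ pvAdjA cells r c then pvWrite out (grid.length - 1) c.toNat else out
        else out) out) out = _
  congr 1
  funext o r
  congr 1
  funext o c
  by_cases h1 : (r, c) ∉ cells ∧ pvCell grid r c = 0
  · by_cases h2 : 3 ≤ pvAdjA cells r c
    · simp [h1, h2]
    · simp [h1, h2]
  · simp [h1]

theorem pv_solveA_canon (grid : List (List Int)) :
    solve_54d82841 grid = pvCanon (grid.map (fun row => row)) (grid.length - 1)
      (fun c0 => ((pvShapesA grid).2).any (fun sh =>
        (PySem.List.pyRange (pvMinR sh.2) (pvMaxR sh.2 + 1) 1).any (fun r =>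
          (PySem.List.pyRange (pvMinC sh.2) (pvMaxC sh.2 + 1) 1).any (fun c =>
            decide (((r, c) ∉ sh.2 ∧ pvCell grid r c = 0) ∧ 3 ≤ pvAdjA sh.2 r c) &&
              (c0 == c.toNat))))) := by
  unfold solve_54d82841
  have h1 : (fun (out : List (List Int)) (sh : Int × List (Int × Int)) => pvMarkShapeA grid sh.2 out) =
      (fun (out : List (List Int)) (sh : Int × List (Int × Int)) =>
        (PySem.List.pyRange (pvMinR sh.2) (pvMaxR sh.2 + 1) 1).foldl (fun o r =>
          (PySem.List.pyRange (pvMinC sh.2) (pvMaxC sh.2 + 1) 1).foldl (fun o c =>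
            if ((r, c) ∉ sh.2 ∧ pvCell grid r c = 0) ∧ 3 ≤ pvAdjA sh.2 r c then
              pvWrite o (grid.length - 1) c.toNat
            else o) o) out) := by
    funext out sh
    exact pv_markA_eq grid sh.2 out
  rw [h1]
  conv_lhs => rw [← pv_canon_false (grid.map (fun row => row)) (grid.length - 1)]
  rw [pv_foldl_write_canon3 (grid.length - 1) (grid.map (fun row => row))
      (fun sh => PySem.List.pyRange (pvMinR sh.2) (pvMaxR sh.2 + 1) 1)
      (fun sh _ => PySem.List.pyRange (pvMinC sh.2) (pvMaxC sh.2 + 1) 1)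
      (fun sh r c => ((r, c) ∉ sh.2 ∧ pvCell grid r c = 0) ∧ 3 ≤ pvAdjA sh.2 r c)
      (fun _ _ c => c.toNat) ((pvShapesA grid).2)]
  rfl

theorem pv_solveB_canon (grid : List (List Int)) :
    solve_54d82841_alt grid = pvCanon (grid.map (fun row => row)) (grid.length - 1)
      (fun c0 => (List.range grid.length).any (fun r =>
        (List.range (grid.headD []).length).any (fun c =>
          decide (pvCell grid (r : Int) (c : Int) = 0 ∧
            (pvIdsB (pvOwnerB grid).1 (r : Int) (c : Int)).any (fun i =>
              decide (3 ≤ (pvIdsB (pvOwnerB grid).1 (r : Int) (c : Int)).count i)) = true) &&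
            (c0 == c)))) := by
  show (List.range grid.length).foldl (fun out (r : Nat) =>
      (List.range (grid.headD []).length).foldl (fun out (c : Nat) =>
        if pvCell grid (r : Int) (c : Int) = 0 then
          let ids := pvIdsB (pvOwnerB grid).1 (r : Int) (c : Int)
          if ids.any (fun i => decide (3 ≤ ids.count i)) then
            pvWrite out (grid.length - 1) c
          else out
        else out) out) (grid.map (fun row => row)) = _
  have h1 : (fun (out : List (List Int)) (r : Nat) =>
      (List.range (grid.headD []).length).foldl (fun out (c : Nat) =>
        if pvCell grid (r : Int) (c : Int) = 0 then
          let ids := pvIdsB (pvOwnerB grid).1 (r : Int) (c : Int)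
          if ids.any (fun i => decide (3 ≤ ids.count i)) then
            pvWrite out (grid.length - 1) c
          else out
        else out) out) = (fun (out : List (List Int)) (r : Nat) =>
      (List.range (grid.headD []).length).foldl (fun out (c : Nat) =>
        if pvCell grid (r : Int) (c : Int) = 0 ∧
            (pvIdsB (pvOwnerB grid).1 (r : Int) (c : Int)).any (fun i =>
              decide (3 ≤ (pvIdsB (pvOwnerB grid).1 (r : Int) (c : Int)).count i)) = true then
          pvWrite out (grid.length - 1) c
        else out) out) := by
    funext out r
    congr 1
    funext out c
    by_cases hz : pvCell grid (r : Int) (c : Int) = 0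
    · by_cases ha : (pvIdsB (pvOwnerB grid).1 (r : Int) (c : Int)).any (fun i =>
          decide (3 ≤ (pvIdsB (pvOwnerB grid).1 (r : Int) (c : Int)).count i)) = true
      · simp only [if_pos hz, if_pos ha, if_pos (And.intro hz ha)]
      · rw [if_pos hz, if_neg ha, if_neg (show ¬(pvCell grid (r : Int) (c : Int) = 0 ∧
            (pvIdsB (pvOwnerB grid).1 (r : Int) (c : Int)).any (fun i =>
              decide (3 ≤ (pvIdsB (pvOwnerB grid).1 (r : Int) (c : Int)).count i)) = true)
          from fun h => ha h.2)]
    · rw [if_neg hz, if_neg (show ¬(pvCell grid (r : Int) (c : Int) = 0 ∧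
            (pvIdsB (pvOwnerB grid).1 (r : Int) (c : Int)).any (fun i =>
              decide (3 ≤ (pvIdsB (pvOwnerB grid).1 (r : Int) (c : Int)).count i)) = true)
          from fun h => hz h.1)]
  rw [h1]
  conv_lhs => rw [← pv_canon_false (grid.map (fun row => row)) (grid.length - 1)]
  rw [pv_foldl_write_canon2 (grid.length - 1) (grid.map (fun row => row))
      (fun _ => List.range (grid.headD []).length)
      (fun (r : Nat) (c : Nat) => pvCell grid (r : Int) (c : Int) = 0 ∧
        (pvIdsB (pvOwnerB grid).1 (r : Int) (c : Int)).any (fun i =>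
          decide (3 ≤ (pvIdsB (pvOwnerB grid).1 (r : Int) (c : Int)).count i)) = true)
      (fun _ (c : Nat) => c) (List.range grid.length)]
  rfl
theorem pv_adjA_iff (cells : List (Int × Int)) (r c : Int) :
    (3 ≤ pvAdjA cells r c) ↔
      3 ≤ (pvNbrs r c).countP (fun nb => decide (nb ∈ cells)) := by
  have e1 : (r + (-1 : Int), c + (0 : Int)) = (r - 1, c) := by simp [Int.sub_eq_add_neg]
  have e2 : (r + (1 : Int), c + (0 : Int)) = (r + 1, c) := by simp
  have e3 : (r + (0 : Int), c + (-1 : Int)) = (r, c - 1) := by simp [Int.sub_eq_add_neg]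
  have e4 : (r + (0 : Int), c + (1 : Int)) = (r, c + 1) := by simp
  simp only [pvAdjA, pvNbrs, List.foldl_cons, List.foldl_nil, List.countP_cons,
    List.countP_nil, decide_eq_true_eq, e1, e2, e3, e4]
  split_ifs <;> omega

theorem pv_ids_count (O : PySem.Dict (Int × Int) Int) (r c i : Int) :
    (pvIdsB O r c).count i = (pvNbrs r c).countP (fun nb => decide (O.get? nb = some i)) := by
  unfold pvIdsB
  rw [List.count_eq_countP, List.countP_map, List.countP_filter]
  refine List.countP_congr ?_
  intro nb _
  simp only [Function.comp]
  rw [PySem.Dict.contains_eq_isSome_get?]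
  cases hg : O.get? nb with
  | none => simp
  | some v =>
    simp only [Option.getD_some, Option.isSome_some, Bool.and_true, decide_eq_true_eq]
    constructor
    · intro h; rw [beq_iff_eq] at h; rw [h]
    · intro h; cases h; simp

theorem pv_bbox_mem (cells : List (Int × Int)) (x : Int × Int) (hx : x ∈ cells) :
    pvMinR cells ≤ x.1 ∧ x.1 ≤ pvMaxR cells ∧ pvMinC cells ≤ x.2 ∧ x.2 ≤ pvMaxC cells := by
  have hne1 : cells.map (fun y => y.1) ≠ [] := by
    intro h
    rw [List.map_eq_nil_iff] at h
    subst h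
    cases hx
  have hne2 : cells.map (fun y => y.2) ≠ [] := by
    intro h
    rw [List.map_eq_nil_iff] at h
    subst h
    cases hx
  refine ⟨?_, ?_, ?_, ?_⟩
  · cases hm : PySem.List.min? (cells.map (fun y => y.1)) (fun x => x) with
    | none => exact absurd ((PySem.List.min?_eq_none_iff _ _).1 hm) hne1
    | some m =>
      have := PySem.List.min?_isMin hm x.1 (List.mem_map_of_mem hx)
      simpa [pvMinR, hm] using this
  · cases hm : PySem.List.max? (cells.map (fun y => y.1)) (fun x => x) with
    | none => exact absurd ((PySem.List.max?_eq_none_iff _ _).1 hm) hne1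
    | some m =>
      have := PySem.List.max?_isMax hm x.1 (List.mem_map_of_mem hx)
      simpa [pvMaxR, hm] using this
  · cases hm : PySem.List.min? (cells.map (fun y => y.2)) (fun x => x) with
    | none => exact absurd ((PySem.List.min?_eq_none_iff _ _).1 hm) hne2
    | some m =>
      have := PySem.List.min?_isMin hm x.2 (List.mem_map_of_mem hx)
      simpa [pvMinC, hm] using this
  · cases hm : PySem.List.max? (cells.map (fun y => y.2)) (fun x => x) with
    | none => exact absurd ((PySem.List.max?_eq_none_iff _ _).1 hm) hne2
    | some m =>
      have := PySem.List.max?_isMax hm x.2 (List.mem_map_of_mem hx)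
      simpa [pvMaxC, hm] using this

theorem pv_three_of_four (cells : List (Int × Int)) (r c : Int)
    (h : 3 ≤ (pvNbrs r c).countP (fun nb => decide (nb ∈ cells))) :
    ((r - 1, c) ∈ cells ∧ (r + 1, c) ∈ cells) ∨ ((r, c - 1) ∈ cells ∧ (r, c + 1) ∈ cells) := by
  simp only [pvNbrs, List.countP_cons, List.countP_nil, decide_eq_true_eq] at h
  split_ifs at h <;>
    first
      | exact Or.inl ⟨by assumption, by assumption⟩
      | exact Or.inr ⟨by assumption, by assumption⟩
      | omega
theorem pv_bbox_attained (cells : List (Int × Int)) (hne : cells ≠ []) :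
    (∃ x ∈ cells, pvMinR cells = x.1) ∧ (∃ x ∈ cells, pvMaxR cells = x.1) ∧
    (∃ x ∈ cells, pvMinC cells = x.2) ∧ (∃ x ∈ cells, pvMaxC cells = x.2) := by
  refine ⟨?_, ?_, ?_, ?_⟩
  · cases hm : PySem.List.min? (cells.map (fun y => y.1)) (fun x => x) with
    | none => exact absurd (List.map_eq_nil_iff.1 ((PySem.List.min?_eq_none_iff _ _).1 hm)) hne
    | some m =>
      obtain ⟨x, hx, hxm⟩ := List.mem_map.1 (PySem.List.min?_mem hm)
      exact ⟨x, hx, by simp [pvMinR, hm, hxm]⟩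
  · cases hm : PySem.List.max? (cells.map (fun y => y.1)) (fun x => x) with
    | none => exact absurd (List.map_eq_nil_iff.1 ((PySem.List.max?_eq_none_iff _ _).1 hm)) hne
    | some m =>
      obtain ⟨x, hx, hxm⟩ := List.mem_map.1 (PySem.List.max?_mem hm)
      exact ⟨x, hx, by simp [pvMaxR, hm, hxm]⟩
  · cases hm : PySem.List.min? (cells.map (fun y => y.2)) (fun x => x) with
    | none => exact absurd (List.map_eq_nil_iff.1 ((PySem.List.min?_eq_none_iff _ _).1 hm)) hne
    | some m =>
      obtain ⟨x, hx, hxm⟩ := List.mem_map.1 (PySem.List.min?_mem hm)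
      exact ⟨x, hx, by simp [pvMinC, hm, hxm]⟩
  · cases hm : PySem.List.max? (cells.map (fun y => y.2)) (fun x => x) with
    | none => exact absurd (List.map_eq_nil_iff.1 ((PySem.List.max?_eq_none_iff _ _).1 hm)) hne
    | some m =>
      obtain ⟨x, hx, hxm⟩ := List.mem_map.1 (PySem.List.max?_mem hm)
      exact ⟨x, hx, by simp [pvMaxC, hm, hxm]⟩

theorem pv_cond_iff (grid : List (List Int)) (c0 : Nat) :
    (((pvShapesA grid).2).any (fun sh =>
        (PySem.List.pyRange (pvMinR sh.2) (pvMaxR sh.2 + 1) 1).any (fun r =>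
          (PySem.List.pyRange (pvMinC sh.2) (pvMaxC sh.2 + 1) 1).any (fun c =>
            decide (((r, c) ∉ sh.2 ∧ pvCell grid r c = 0) ∧ 3 ≤ pvAdjA sh.2 r c) &&
              (c0 == c.toNat)))) = true) ↔
    ((List.range grid.length).any (fun r =>
        (List.range (grid.headD []).length).any (fun c =>
          decide (pvCell grid (r : Int) (c : Int) = 0 ∧
            (pvIdsB (pvOwnerB grid).1 (r : Int) (c : Int)).any (fun i =>
              decide (3 ≤ (pvIdsB (pvOwnerB grid).1 (r : Int) (c : Int)).count i)) = true) &&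
            (c0 == c))) = true) := by
  obtain ⟨hsid, hmem, hcls, hrange, hprops⟩ := pv_scan_inv grid
  simp only [List.any_eq_true, Bool.and_eq_true, decide_eq_true_eq, beq_iff_eq,
    PySem.List.mem_pyRange_one, List.mem_range]
  constructor
  · rintro ⟨sh, hsh, r, ⟨hr1, hr2⟩, c, ⟨hc1, hc2⟩, ⟨⟨hnotin, hval⟩, hadj⟩, hc0⟩
    obtain ⟨k, hk, hgetk⟩ := List.mem_iff_getElem.1 hsh
    have hgetD : (pvShapesA grid).2.getD k (0, []) = sh := by
      rw [List.getD_eq_getElem _ _ hk, hgetk]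
    obtain ⟨hne, hcellprops⟩ := hprops k hk
    rw [hgetD] at hne hcellprops
    have hcls' : ∀ x, x ∈ sh.2 ↔ (pvOwnerB grid).1.get? x = some (k : Int) := by
      intro x; have := hcls k hk x; rwa [hgetD] at this
    obtain ⟨⟨xm, hxm, hxm1⟩, ⟨xM, hxM, hxM1⟩, ⟨ym, hym, hym2⟩, ⟨yM, hyM, hyM2⟩⟩ :=
      pv_bbox_attained sh.2 hne
    have hr0 : 0 ≤ r := le_trans (by rw [hxm1]; exact (hcellprops xm hxm).1) hr1
    have hrh : r < (grid.length : Int) := by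
      have := (hcellprops xM hxM).2.1
      omega
    have hc0' : 0 ≤ c := le_trans (by rw [hym2]; exact (hcellprops ym hym).2.2.1) hc1
    have hcw : c < ((grid.headD []).length : Int) := by
      have := (hcellprops yM hyM).2.2.2.1
      omega
    refine ⟨r.toNat, by omega, c.toNat, by omega, ⟨?_, ?_⟩, by omega⟩
    · rw [Int.toNat_of_nonneg hr0, Int.toNat_of_nonneg hc0']
      exact hval
    · refine ⟨(k : Int), ?_, ?_⟩
      · rw [Int.toNat_of_nonneg hr0, Int.toNat_of_nonneg hc0']
        unfold pvIdsB
        have hcount : 0 < (pvIdsB (pvOwnerB grid).1 r c).count (k : Int) := by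
          rw [pv_ids_count]
          have : (pvNbrs r c).countP (fun nb => decide ((pvOwnerB grid).1.get? nb = some (k : Int))) =
              (pvNbrs r c).countP (fun nb => decide (nb ∈ sh.2)) := by
            refine List.countP_congr ?_
            intro nb _
            simp only [decide_eq_true_eq]
            exact (hcls' nb).symm
          rw [this]
          have := (pv_adjA_iff sh.2 r c).1 hadj
          omega
        have := List.count_pos_iff.1 hcount
        unfold pvIdsB at this
        exact this
      · rw [Int.toNat_of_nonneg hr0, Int.toNat_of_nonneg hc0']
        rw [pv_ids_count]
        have : (pvNbrs r c).countP (fun nb => decide ((pvOwnerB grid).1.get? nb = some (k : Int))) =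
            (pvNbrs r c).countP (fun nb => decide (nb ∈ sh.2)) := by
          refine List.countP_congr ?_
          intro nb _
          simp only [decide_eq_true_eq]
          exact (hcls' nb).symm
        rw [this]
        have := (pv_adjA_iff sh.2 r c).1 hadj
        omega
  · rintro ⟨r, hr, c, hc, ⟨hval, hany⟩, hc0⟩
    obtain ⟨i, hiids, hicount⟩ := hany
    obtain ⟨nb, hnbfil, hnbi⟩ := List.mem_map.1 hiids
    have hnbcont := (List.mem_filter.1 hnbfil).2
    have hnbget : (pvOwnerB grid).1.get? nb = some i := by
      rw [PySem.Dict.contains_eq_isSome_get?] at hnbcont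
      cases hg : (pvOwnerB grid).1.get? nb with
      | none => rw [hg] at hnbcont; cases hnbcont
      | some v => rw [hg] at hnbi; simp at hnbi; rw [hnbi]
    obtain ⟨hi0, hisid⟩ := hrange nb i hnbget
    have hk : i.toNat < (pvShapesA grid).2.length := by omega
    have hik : ((i.toNat : Nat) : Int) = i := Int.toNat_of_nonneg hi0
    have hcls' : ∀ x, x ∈ ((pvShapesA grid).2.getD i.toNat (0, [])).2 ↔
        (pvOwnerB grid).1.get? x = some i := by
      intro x
      have := hcls i.toNat hk x
      rwa [hik] at this
    have hcount3 : 3 ≤ (pvNbrs (r : Int) (c : Int)).countP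
        (fun nb => decide (nb ∈ ((pvShapesA grid).2.getD i.toNat (0, [])).2)) := by
      rw [pv_ids_count] at hicount
      have : (pvNbrs (r : Int) (c : Int)).countP (fun nb => decide ((pvOwnerB grid).1.get? nb = some i)) =
          (pvNbrs (r : Int) (c : Int)).countP
            (fun nb => decide (nb ∈ ((pvShapesA grid).2.getD i.toNat (0, [])).2)) := by
        refine List.countP_congr ?_
        intro nb _
        simp only [decide_eq_true_eq]
        exact (hcls' nb).symm
      omega
    obtain ⟨hne, hcellprops⟩ := hprops i.toNat hk
    have hbounds := pv_three_of_four _ _ _ hcount3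
    have hbbox : pvMinR ((pvShapesA grid).2.getD i.toNat (0, [])).2 ≤ (r : Int) ∧
        (r : Int) ≤ pvMaxR ((pvShapesA grid).2.getD i.toNat (0, [])).2 ∧
        pvMinC ((pvShapesA grid).2.getD i.toNat (0, [])).2 ≤ (c : Int) ∧
        (c : Int) ≤ pvMaxC ((pvShapesA grid).2.getD i.toNat (0, [])).2 := by
      rcases hbounds with ⟨hN, hS⟩ | ⟨hW, hE⟩
      · have h1 := pv_bbox_mem _ _ hN
        have h2 := pv_bbox_mem _ _ hS
        simp only at h1 h2
        refine ⟨by omega, by omega, by omega, by omega⟩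
      · have h1 := pv_bbox_mem _ _ hW
        have h2 := pv_bbox_mem _ _ hE
        simp only at h1 h2
        refine ⟨by omega, by omega, by omega, by omega⟩
    have hnotin : ((r : Int), (c : Int)) ∉ ((pvShapesA grid).2.getD i.toNat (0, [])).2 := by
      intro hmem'
      have := (hcellprops _ hmem').2.2.2.2
      rw [hval] at this
      exact this.2 this.1.symm
    refine ⟨(pvShapesA grid).2.getD i.toNat (0, []), ?_, (r : Int), ⟨hbbox.1, by omega⟩,
      (c : Int), ⟨hbbox.2.2.1, by omega⟩, ⟨⟨hnotin, hval⟩, ?_⟩, by simp [hc0]⟩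
    · rw [List.getD_eq_getElem _ _ hk]
      exact List.getElem_mem hk
    · rw [pv_adjA_iff]
      exact hcount3
theorem pv_bool_ext (a b : Bool) (h : a = true ↔ b = true) : a = b := by
  cases a <;> cases b <;> simp_all

theorem pv_main (grid : List (List Int)) : solve_54d82841 grid = solve_54d82841_alt grid := by
  rw [pv_solveA_canon, pv_solveB_canon]
  congr 1
  funext c0
  exact pv_bool_ext _ _ (pv_cond_iff grid c0)

-- ===== VERDICT (by name: the statement is the Claim_ definition above) =====
theorem solve_54d82841_spec : Claim_equal_solve_54d82841 := by
  intro grid _ _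
  unfold Spec_solve_54d82841
  exact pv_main grid
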